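-- pv_equiv track=rewrite | github.com/whatever60/sgad | src/sgad/alignment_parser/_common.py | normalize_top_row
-- ===== SOURCE A (Python) =====
-- def _first_last_letter(row: str) -> tuple[int | None, int | None]:
--     """Return indices of the first and last alphabetic character in *row*."""
--     idxs = [i for i, ch in enumerate(row) if ch.isalpha()]
--     if not idxs:
--         return None, None
--     return idxs[0], idxs[-1]
--
-- def normalize_top_row(row: str) -> str:
--     """Apply SEQ / top-strand end convention.
--
--     - Left of first base and internal span: spaces → ``-``; existing ``-`` kept.
--     - Right of last base: ``-`` → space (free 3′ overhang shown as spaces).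
--     """
--     first, last = _first_last_letter(row)
--     if first is None:
--         return row.replace(" ", "-")
--     assert last is not None
--     chars = list(row)
--     for i in range(0, last + 1):
--         if chars[i] == " ":
--             chars[i] = "-"
--     for i in range(last + 1, len(chars)):
--         if chars[i] == "-":
--             chars[i] = " "
--     return "".join(chars)
-- ===== SOURCE B (Python) =====
-- def normalize_top_row(row: str) -> str:
--     """Same convention, via one boundary index and two bulk replaces."""
--     split = len(row)
--     for i in range(len(row) - 1, -1, -1):
--         if row[i].isalpha():
--             split = i + 1
--             break
--     return row[:split].replace(" ", "-") + row[split:].replace("-", " ")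
-- ===== Notes on version B (the rewrite author's own statement) =====
-- stated objective: simpler
-- what changed: Instead of collecting all alphabetic indices and mutating a char list with two ranged Python loops, B finds the split point (last letter + 1) by a single reverse scan that stops at the first letter and returns two bulk slice str.replace calls.
import Mathlib
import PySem

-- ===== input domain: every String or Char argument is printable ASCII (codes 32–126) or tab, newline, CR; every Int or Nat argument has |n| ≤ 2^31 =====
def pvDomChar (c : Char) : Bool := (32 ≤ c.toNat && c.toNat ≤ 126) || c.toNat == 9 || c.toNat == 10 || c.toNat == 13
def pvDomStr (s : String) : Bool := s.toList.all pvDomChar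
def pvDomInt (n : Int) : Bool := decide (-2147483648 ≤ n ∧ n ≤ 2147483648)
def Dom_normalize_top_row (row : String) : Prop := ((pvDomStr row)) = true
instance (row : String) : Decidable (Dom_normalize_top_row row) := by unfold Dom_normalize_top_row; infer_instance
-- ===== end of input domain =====

-- B replaces A's index collection + in-place char-list loops by one reverse scan for the
-- split point and two bulk slice replaces (objective: simpler).

-- ===== PORT A =====
-- helper _first_last_letter: indices of first and last alphabetic character
def pv_first_last_letter (row : String) : Option Int × Option Int :=
  let idxs := ((PySem.List.enumerate row.toList 0).filter
      (fun p => PySem.Chars.isalpha p.2)).map (·.1)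
  if idxs.isEmpty then (none, none)
  else (PySem.List.pyGet? idxs 0, PySem.List.pyGet? idxs (-1))

def normalize_top_row (row : String) : String :=
  let fl := pv_first_last_letter row
  match fl.1, fl.2 with
  | none, _ => PySem.Str.replace row " " "-"
  | some _, none => row   -- unreachable (Python's `assert last is not None`)
  | some _, some last =>
    let chars := row.toList
    let chars := (PySem.List.pyRange 0 (last + 1) 1).foldl
      (fun cs i => if PySem.List.pyGetD cs i ' ' = ' ' then cs.set i.toNat '-' else cs) chars
    let chars := (PySem.List.pyRange (last + 1) (chars.length : Int) 1).foldl
      (fun cs i => if PySem.List.pyGetD cs i ' ' = '-' then cs.set i.toNat ' ' else cs) chars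
    String.ofList chars

-- ===== PORT B =====
-- the reverse `for i in range(len(row)-1, -1, -1): if row[i].isalpha(): split = i+1; break`
def pvSplitGo (cs : List Char) : Nat → Nat
  | 0 => cs.length
  | (i + 1) => if PySem.Chars.isalpha (cs.getD i ' ') then i + 1 else pvSplitGo cs i

def normalize_top_row_alt (row : String) : String :=
  let cs := row.toList
  let split := pvSplitGo cs cs.length
  String.ofList
    (PySem.Chars.replace (PySem.List.slice cs none (some (split : Int))) [' '] ['-'] ++
     PySem.Chars.replace (PySem.List.slice cs (some (split : Int)) none) ['-'] [' '])

-- ===== PRECONDITION & SPEC =====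
def Spec_normalize_top_row (row : String) (out : String) : Prop := out = normalize_top_row_alt row
instance (row : String) (out : String) : Decidable (Spec_normalize_top_row row out) := by unfold Spec_normalize_top_row; infer_instance

-- ===== CLAIM (what is proved, stated in full; the proofs are below) =====
def Claim_equal_normalize_top_row : Prop := ∀ (row : String), Dom_normalize_top_row row → Spec_normalize_top_row row (normalize_top_row row)

-- ===== LEMMAS AND PROOFS =====

-- last alphabetic index strictly below n (proof-side characterisation)
def pvLastAlphaLt (cs : List Char) : Nat → Option Nat
  | 0 => none
  | (i + 1) => if PySem.Chars.isalpha (cs.getD i ' ') then some i else pvLastAlphaLt cs i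

theorem pvSplitGo_eq (cs : List Char) (n : Nat) :
    pvSplitGo cs n = match pvLastAlphaLt cs n with
      | some j => j + 1
      | none => cs.length := by
  induction n with
  | zero => simp [pvSplitGo, pvLastAlphaLt]
  | succ i ih =>
    simp only [pvSplitGo, pvLastAlphaLt]
    split_ifs <;> simp [ih]

theorem pvLastAlphaLt_append (ds : List Char) (c : Char) (i : Nat) (hi : i ≤ ds.length) :
    pvLastAlphaLt (ds ++ [c]) i = pvLastAlphaLt ds i := by
  induction i with
  | zero => rfl
  | succ k ih =>
    have hk : k < ds.length := by omega
    have hget : (ds ++ [c]).getD k ' ' = ds.getD k ' ' := by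
      simp [List.getD, List.getElem?_append_left hk]
    simp only [pvLastAlphaLt, hget, ih (by omega)]

-- the index list A builds, related to pvLastAlphaLt
theorem idxs_getLast_eq (cs : List Char) :
    (((PySem.List.enumerate cs 0).filter (fun p => PySem.Chars.isalpha p.2)).map (·.1)).getLast?
      = (pvLastAlphaLt cs cs.length).map (fun j => (j : Int)) := by
  induction cs using List.reverseRecOn with
  | nil => rfl
  | append_singleton ds c ih =>
    rw [PySem.List.enumerate_append]
    simp only [List.filter_append, List.map_append, List.length_append, List.length_singleton]
    have hget : (ds ++ [c]).getD ds.length ' ' = c := by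
      simp [List.getD]
    by_cases h : PySem.Chars.isalpha c = true
    · simp [PySem.List.enumerate, h, pvLastAlphaLt]
    · simp only [pvLastAlphaLt, hget, h]
      simp [PySem.List.enumerate, h, pvLastAlphaLt_append ds c ds.length le_rfl, ih]

-- single-character str.replace is a pointwise map
theorem replace_go_single (o n : Char) :
    ∀ (fuel : Nat) (l acc : List Char), l.length ≤ fuel →
      PySem.Chars.replace.go [o] [n] fuel l acc
        = acc.reverse ++ l.map (fun c => if c = o then n else c) := by
  intro fuel
  induction fuel with
  | zero =>
    intro l acc h
    have : l = [] := List.eq_nil_of_length_eq_zero (by omega)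
    subst this; simp [PySem.Chars.replace.go]
  | succ f ih =>
    intro l acc h
    match l with
    | [] => simp [PySem.Chars.replace.go]
    | c :: t =>
      by_cases hc : c = o
      · subst hc
        have hpre : [c].isPrefixOf (c :: t) = true := by simp [List.isPrefixOf]
        simp only [PySem.Chars.replace.go, hpre, if_pos]
        rw [show List.drop [c].length (c :: t) = t by simp]
        rw [ih t ([n].reverse ++ acc) (by simpa using Nat.lt_succ_iff.mp (by simpa using h))]
        simp
      · have hpre : [o].isPrefixOf (c :: t) = false := by
          simp [List.isPrefixOf]; exact fun hh => hc hh.symm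
        simp only [PySem.Chars.replace.go, hpre]
        rw [if_neg (by simp)]
        rw [ih t (c :: acc) (by simpa using Nat.lt_succ_iff.mp (by simpa using h))]
        simp [hc]

theorem replace_single (l : List Char) (o n : Char) :
    PySem.Chars.replace l [o] [n] = l.map (fun c => if c = o then n else c) := by
  rw [PySem.Chars.replace]
  simp only [List.isEmpty_cons, if_neg Bool.false_ne_true]
  simpa using replace_go_single o n l.length l [] le_rfl

-- a ranged set-loop is a bulk map on the touched segment
theorem setloop_eq (p q : Char) :
    ∀ (m a : Nat) (X : List Char), a + m ≤ X.length →
      (PySem.List.pyRange (a : Int) ((a : Int) + (m : Int)) 1).foldl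
        (fun cs i => if PySem.List.pyGetD cs i ' ' = p then cs.set i.toNat q else cs) X
      = X.take a ++ ((X.drop a).take m).map (fun c => if c = p then q else c) ++ X.drop (a + m) := by
  intro m
  induction m with
  | zero =>
    intro a X h
    rw [PySem.List.pyRange_one_eq_nil (by omega)]
    simp
  | succ k ih =>
    intro a X h
    have ha : a < X.length := by omega
    rw [PySem.List.pyRange_one_cons (by omega)]
    simp only [List.foldl_cons]
    have hget : PySem.List.pyGetD X (a : Int) ' ' = X[a] := by
      rw [PySem.List.pyGetD_eq_getElem X ' ' (by omega) (by exact_mod_cast ha)]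
      simp
    have hstep : (if PySem.List.pyGetD X (a : Int) ' ' = p then X.set (a : Int).toNat q else X)
        = X.set a (if X[a] = p then q else X[a]) := by
      rw [hget]
      by_cases hp : X[a] = p
      · simp [hp]
      · simp [hp, List.set_getElem_self ha]
    rw [hstep]
    have hcast : (a : Int) + ((k + 1 : Nat) : Int) = ((a + 1 : Nat) : Int) + ((k : Nat) : Int) := by
      push_cast; ring
    have hcast1 : (a : Int) + 1 = ((a + 1 : Nat) : Int) := by push_cast; ring
    rw [hcast, hcast1, ih (a + 1) (X.set a (if X[a] = p then q else X[a])) (by simp; omega)]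
    have hset : X.set a (if X[a] = p then q else X[a])
        = X.take a ++ (if X[a] = p then q else X[a]) :: X.drop (a + 1) := by
      rw [List.set_eq_take_append_cons_drop, if_pos ha]
    rw [hset]
    have hT : (X.take a).length = a := by rw [List.length_take]; omega
    have e1 : (X.take a ++ (if X[a] = p then q else X[a]) :: X.drop (a + 1)).take (a + 1)
        = X.take a ++ [if X[a] = p then q else X[a]] := by
      simp [List.take_append, hT, List.take_take]
    have e2 : (X.take a ++ (if X[a] = p then q else X[a]) :: X.drop (a + 1)).drop (a + 1)
        = X.drop (a + 1) := by
      simp [List.drop_append, hT]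
    have e3 : (X.take a ++ (if X[a] = p then q else X[a]) :: X.drop (a + 1)).drop (a + 1 + k)
        = (X.drop (a + 1)).drop k := by
      rw [List.drop_append, hT]
      have h1 : a + 1 + k - a = k + 1 := by omega
      have h2 : List.drop (a + 1 + k) (X.take a) = [] :=
        List.drop_eq_nil_of_le (by rw [List.length_take]; omega)
      rw [h1, h2, List.drop_succ_cons, List.nil_append]
    rw [e1, e2, e3]
    rw [List.drop_eq_getElem_cons ha]
    simp only [List.take_succ_cons, List.map_cons]
    have e4 : X.drop (a + (k + 1)) = (X.drop (a + 1)).drop k := by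
      rw [List.drop_drop]; congr 1; omega
    rw [e4]
    simp [List.append_assoc]

theorem pvLastAlphaLt_lt (cs : List Char) (n j : Nat) (h : pvLastAlphaLt cs n = some j) :
    j < n := by
  induction n with
  | zero => simp [pvLastAlphaLt] at h
  | succ i ih =>
    simp only [pvLastAlphaLt] at h
    split_ifs at h with hc
    · simp only [Option.some.injEq] at h; omega
    · exact Nat.lt_succ_of_lt (ih h)

theorem pyGet_neg_one {α : Type} (l : List α) (h : l ≠ []) :
    PySem.List.pyGet? l (-1) = l.getLast? := by
  have h1 : 1 ≤ l.length := List.length_pos_iff.mpr h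
  simp [PySem.List.pyGet?, PySem.List.pyIdx?, h1, List.getLast?_eq_getElem?]

-- final assembly
theorem pv_main_eq (row : String) : normalize_top_row row = normalize_top_row_alt row := by
  unfold normalize_top_row normalize_top_row_alt pv_first_last_letter
  set cs := row.toList with hcs
  set idxs := ((PySem.List.enumerate cs 0).filter (fun p => PySem.Chars.isalpha p.2)).map (·.1)
    with hidxs
  by_cases h : idxs = []
  · have hlast : (pvLastAlphaLt cs cs.length).map (fun j => (j : Int)) = none := by
      rw [← idxs_getLast_eq, ← hidxs, h]; rfl
    have hnone : pvLastAlphaLt cs cs.length = none := by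
      cases hE : pvLastAlphaLt cs cs.length <;> simp [hE] at hlast ⊢
    have hsplit : pvSplitGo cs cs.length = cs.length := by rw [pvSplitGo_eq, hnone]
    simp only [h, List.isEmpty_nil, if_pos]
    apply String.toList_inj.mp
    rw [PySem.Str.toList_replace]
    have hsp : (" " : String).toList = [' '] := rfl
    have hdash : ("-" : String).toList = ['-'] := rfl
    rw [hsp, hdash, hsplit]
    simp [PySem.List.slice_to_natCast, PySem.List.slice_from_natCast, replace_single]
    rfl
  · -- there is a letter
    obtain ⟨j, hsome⟩ : ∃ j, pvLastAlphaLt cs cs.length = some j := by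
      cases hE : pvLastAlphaLt cs cs.length with
      | some j => exact ⟨j, rfl⟩
      | none =>
        exfalso
        have := idxs_getLast_eq cs
        rw [← hidxs, hE] at this
        exact h (List.getLast?_eq_none_iff.mp (by simpa using this))
    have hjlt : j < cs.length := pvLastAlphaLt_lt cs cs.length j hsome
    have hglast : PySem.List.pyGet? idxs (-1) = some ((j : Nat) : Int) := by
      rw [pyGet_neg_one idxs h, hidxs, idxs_getLast_eq cs, hsome]; rfl
    have hhead : ∃ x, PySem.List.pyGet? idxs 0 = some x := by
      obtain ⟨x, xs, hx⟩ := List.exists_cons_of_ne_nil h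
      exact ⟨x, by simp [hx, PySem.List.pyGet?, PySem.List.pyIdx?]⟩
    obtain ⟨x0, hx0⟩ := hhead
    have hne : idxs.isEmpty = false := by simp [h]
    simp only [hne, if_neg Bool.false_ne_true, hx0, hglast]
    -- first loop becomes a bulk map on cs[0:j+1]
    have hr1 : PySem.List.pyRange 0 (((j : Nat) : Int) + 1) 1
        = PySem.List.pyRange ((0 : Nat) : Int) (((0 : Nat) : Int) + ((j + 1 : Nat) : Int)) 1 := by
      push_cast; ring_nf
    rw [hr1, setloop_eq ' ' '-' (j + 1) 0 cs (by omega)]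
    simp only [List.take_zero, List.drop_zero, List.nil_append, Nat.zero_add]
    have hPlen : ((cs.take (j + 1)).map (fun c => if c = ' ' then '-' else c)).length = j + 1 := by
      simp [List.length_take]; omega
    have hXlen : ((cs.take (j + 1)).map (fun c => if c = ' ' then '-' else c) ++ cs.drop (j + 1)).length = cs.length := by
      simp [List.length_take]; omega
    rw [hXlen]
    -- second loop becomes a bulk map on cs[j+1:]
    have hr2 : PySem.List.pyRange (((j : Nat) : Int) + 1) ((cs.length : Nat) : Int) 1
        = PySem.List.pyRange (((j + 1 : Nat)) : Int) ((((j + 1 : Nat)) : Int) + ((cs.length - (j + 1) : Nat) : Int)) 1 := by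
      congr 1; push_cast; omega
    rw [hr2, setloop_eq '-' ' ' (cs.length - (j + 1)) (j + 1)
      ((cs.take (j + 1)).map (fun c => if c = ' ' then '-' else c) ++ cs.drop (j + 1))
      (by simp [List.length_take]; omega)]
    have e1 : ((cs.take (j + 1)).map (fun c => if c = ' ' then '-' else c) ++ cs.drop (j + 1)).take (j + 1)
        = (cs.take (j + 1)).map (fun c => if c = ' ' then '-' else c) := by
      simp [List.take_append, List.take_of_length_le]
      omega
    have e2 : ((cs.take (j + 1)).map (fun c => if c = ' ' then '-' else c) ++ cs.drop (j + 1)).drop (j + 1)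
        = cs.drop (j + 1) := by
      have hnil : List.drop (j + 1) ((cs.take (j + 1)).map (fun c => if c = ' ' then '-' else c)) = [] :=
        List.drop_eq_nil_of_le (le_of_eq hPlen)
      rw [List.drop_append, hnil, hPlen, Nat.sub_self, List.drop_zero, List.nil_append]
    have e3 : (cs.drop (j + 1)).take (cs.length - (j + 1)) = cs.drop (j + 1) :=
      List.take_of_length_le (by simp)
    have e4 : ((cs.take (j + 1)).map (fun c => if c = ' ' then '-' else c) ++ cs.drop (j + 1)).drop (j + 1 + (cs.length - (j + 1))) = [] :=
      List.drop_eq_nil_of_le (by simp [List.length_take])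
    rw [e1, e2, e3, e4, List.append_nil]
    -- B side
    have hsplit2 : pvSplitGo cs cs.length = j + 1 := by rw [pvSplitGo_eq, hsome]
    rw [hsplit2, PySem.List.slice_to_natCast, PySem.List.slice_from_natCast,
      replace_single, replace_single]

-- ===== VERDICT (by name: the statement is the Claim_ definition above) =====
theorem normalize_top_row_spec : Claim_equal_normalize_top_row := by
  intro row _
  unfold Spec_normalize_top_row
  exact pv_main_eq row
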